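-- pv_equiv track=rewrite | github.com/sacha-sz/UTC-INF2 | TD/TD2/TD2-3.py | carre_magique_normal
-- ===== SOURCE A (Python) =====
-- def carre_magique_normal(mat):
--     list = []
--     for i in range(1, (len(mat)**2 + 1)):
--         list.append(i)
--     for ligne in mat:
--         for elt in ligne:
--             if elt in list:
--                 list.remove(elt)
--     if not list:
--         return True
--     else:
--         return False
-- ===== SOURCE B (Python) =====
-- def carre_magique_normal(mat):
--     seen = {elt for ligne in mat for elt in ligne}
--     return all(k in seen for k in range(1, len(mat)**2 + 1))
-- ===== Notes on version B (the rewrite author's own statement) =====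
-- stated objective: faster
-- what changed: Instead of consuming a pre-built 1..n^2 list while scanning the matrix (each removal an O(n^2) scan), B flattens the matrix once into a hash set and iterates over the required targets 1..n^2 querying the set.
import Mathlib
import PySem

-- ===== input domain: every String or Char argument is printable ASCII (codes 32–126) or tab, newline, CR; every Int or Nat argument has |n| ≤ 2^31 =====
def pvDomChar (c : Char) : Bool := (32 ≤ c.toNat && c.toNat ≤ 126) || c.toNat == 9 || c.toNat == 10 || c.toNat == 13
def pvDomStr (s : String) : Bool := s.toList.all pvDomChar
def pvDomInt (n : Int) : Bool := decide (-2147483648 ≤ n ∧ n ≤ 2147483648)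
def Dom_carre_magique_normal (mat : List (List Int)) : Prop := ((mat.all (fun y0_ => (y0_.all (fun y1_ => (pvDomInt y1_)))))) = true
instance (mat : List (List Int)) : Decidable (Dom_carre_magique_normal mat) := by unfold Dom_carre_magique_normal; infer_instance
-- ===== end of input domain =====

-- B replaces A's repeated inner scans (membership + remove on a shrinking list) by one flatten-into-a-set
-- pass followed by membership queries over the targets 1..n²; objective: faster (asymptotic).

-- ===== PORT A =====
-- literal port: build the list 1..len(mat)**2 by appending, then scan the matrix removing found elements
def carre_magique_normal (mat : List (List Int)) : Bool :=
  let l0 : List Int :=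
    (PySem.List.pyRange 1 ((mat.length : Int) ^ 2 + 1)).foldl (fun l i => l ++ [i]) []
  let l : List Int :=
    mat.foldl (fun acc ligne =>
      ligne.foldl (fun acc elt =>
        if acc.contains elt then (PySem.List.remove? acc elt).getD acc else acc) acc) l0
  if l.isEmpty then true else false

-- ===== PORT B =====
-- literal port of Source B: seen = {elt for ligne in mat for elt in ligne}; all(k in seen for k in range(1, len(mat)**2+1))
def carre_magique_normal_alt (mat : List (List Int)) : Bool :=
  let seen : PySem.Set Int :=
    mat.foldl (fun s ligne => ligne.foldl (fun s elt => PySem.Set.add s elt) s) PySem.Set.empty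
  (PySem.List.pyRange 1 ((mat.length : Int) ^ 2 + 1)).all (fun k => PySem.Set.contains seen k)

-- ===== PRECONDITION & SPEC =====
def Spec_carre_magique_normal (mat : List (List Int)) (out : Bool) : Prop := out = carre_magique_normal_alt mat
instance (mat : List (List Int)) (out : Bool) : Decidable (Spec_carre_magique_normal mat out) := by unfold Spec_carre_magique_normal; infer_instance

-- ===== CLAIM (what is proved, stated in full; the proofs are below) =====
def Claim_equal_carre_magique_normal : Prop := ∀ (mat : List (List Int)), Dom_carre_magique_normal mat → Spec_carre_magique_normal mat (carre_magique_normal mat)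

-- ===== LEMMAS AND PROOFS =====

-- A's inner step on a duplicate-free list is just a filter
theorem pv_step_eq_filter (l : List Int) (e : Int) (h : l.Nodup) :
    (if l.contains e then (PySem.List.remove? l e).getD l else l) = l.filter (fun x => x != e) := by
  by_cases hm : e ∈ l
  · have hc : l.contains e = true := List.contains_iff_mem.mpr hm
    rw [if_pos hc, PySem.List.remove?_eq_some_erase l e hm, Option.getD_some,
      List.Nodup.erase_eq_filter h]
  · have hc : l.contains e = false := by simp [hm]
    rw [hc]
    simp only [if_neg Bool.false_ne_true]
    symm
    apply List.filter_eq_self.mpr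
    intro x hx
    simp only [bne_iff_ne, ne_eq]
    exact fun hxe => hm (hxe ▸ hx)

-- folding A's step over a list of elements filters out everything that occurs in it
theorem pv_foldl_step (es : List Int) : ∀ (l : List Int), l.Nodup →
    es.foldl (fun acc elt => if acc.contains elt then (PySem.List.remove? acc elt).getD acc else acc) l
      = l.filter (fun x => !es.contains x) := by
  induction es with
  | nil => intro l _; simp
  | cons e es ih =>
    intro l h
    rw [List.foldl_cons, pv_step_eq_filter l e h, ih _ (h.filter _), List.filter_filter]
    apply List.filter_congr
    intro x _
    by_cases hxe : x = e <;> simp [hxe]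

theorem pv_l0_eq (mat : List (List Int)) :
    (PySem.List.pyRange 1 ((mat.length : Int) ^ 2 + 1)).foldl (fun l i => l ++ [i]) []
      = PySem.List.pyRange 1 ((mat.length : Int) ^ 2 + 1) := by
  generalize PySem.List.pyRange 1 ((mat.length : Int) ^ 2 + 1) = r
  induction r using List.reverseRecOn with
  | nil => rfl
  | append_singleton xs x ih => rw [List.foldl_append, List.foldl_cons, List.foldl_nil, ih]

theorem pv_pyRange_nodup (b : Int) : (PySem.List.pyRange 1 b).Nodup := by
  rw [PySem.List.pyRange_of_pos 1 b (by norm_num)]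
  exact (List.nodup_range).map (fun k₁ k₂ hk => by omega)

-- ===== VERDICT (by name: the statement is the Claim_ definition above) =====
theorem carre_magique_normal_spec : Claim_equal_carre_magique_normal := by
  intro mat _
  unfold Spec_carre_magique_normal carre_magique_normal carre_magique_normal_alt
  simp only [pv_l0_eq, ← List.foldl_flatten]
  rw [pv_foldl_step mat.flatten _ (pv_pyRange_nodup _)]
  rw [show (∀ (b : Bool), (if b then true else false) = b) from by decide]
  rw [show (List.foldl (fun s elt => PySem.Set.add s elt) PySem.Set.empty mat.flatten)
        = PySem.Set.ofList mat.flatten from (PySem.Set.ofList_eq_foldl _).symm]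
  apply Bool.eq_iff_iff.mpr
  simp only [List.isEmpty_iff, List.filter_eq_nil_iff, List.all_eq_true,
    PySem.Set.contains_iff, PySem.Set.mem_ofList, Bool.not_eq_true', Bool.not_eq_false,
    List.contains_iff_mem]
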